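-- pv_equiv track=rewrite | github.com/guidance-ai/guidance | guidance/library/_regex_utils.py | lexi_x_to_9
-- ===== SOURCE A (Python) =====
-- def mk_or(parts: list[str]) -> str:
--     if len(parts) == 1:
--         return parts[0]
--     return "(" + "|".join(parts) + ")"
--
-- def lexi_x_to_9(x: str, incl: bool) -> str:
--     if incl:
--         if x == "":
--             return "[0-9]*"
--         if len(x) == 1:
--             return f"[{x}-9][0-9]*"
--     else:
--         if x == "":
--             return "[0-9]*[1-9]"
--     x0 = int(x[0])
--     parts = [x[0] + lexi_x_to_9(x[1:], incl)]
--     if x0 < 9: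
--         parts.append(f"[{x0 + 1}-9][0-9]*")
--     return mk_or(parts)
-- ===== SOURCE B (Python) =====
-- def lexi_x_to_9(x: str, incl: bool) -> str:
--     # Iterative bottom-up build: fold over the digits right-to-left instead of recursing.
--     if x == "":
--         return "[0-9]*" if incl else "[0-9]*[1-9]"
--     if incl:
--         acc = f"[{x[-1]}-9][0-9]*"
--     else:
--         d = int(x[-1])
--         branch = x[-1] + "[0-9]*[1-9]"
--         acc = f"({branch}|[{d + 1}-9][0-9]*)" if d < 9 else branch
--     for c in reversed(x[:-1]):
--         d = int(c)
--         branch = c + acc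
--         acc = f"({branch}|[{d + 1}-9][0-9]*)" if d < 9 else branch
--     return acc
-- ===== Notes on version B (the rewrite author's own statement) =====
-- stated objective: alternative
-- what changed: Replaced the head-first recursion with helper mk_or and a parts list by a single right-to-left loop over the digits that accumulates the regex bottom-up with inlined alternation formatting.
import Mathlib
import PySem

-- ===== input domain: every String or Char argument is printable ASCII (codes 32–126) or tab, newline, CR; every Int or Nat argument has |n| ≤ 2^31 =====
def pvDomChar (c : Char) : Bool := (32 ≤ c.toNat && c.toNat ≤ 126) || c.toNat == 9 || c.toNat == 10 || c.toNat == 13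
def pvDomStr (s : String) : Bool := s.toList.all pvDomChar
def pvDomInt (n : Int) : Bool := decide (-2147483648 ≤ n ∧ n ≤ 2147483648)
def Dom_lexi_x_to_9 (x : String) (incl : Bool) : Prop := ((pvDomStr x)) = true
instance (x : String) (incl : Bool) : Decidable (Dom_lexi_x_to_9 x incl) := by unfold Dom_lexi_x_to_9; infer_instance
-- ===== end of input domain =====

-- ===== PORT A =====
-- A is the recursive builder; B (lexi_x_to_9_alt) builds the same regex by one right-to-left loop.
def mk_or (parts : List String) : String :=
  if parts.length = 1 then parts.headD ""
  else "(" ++ PySem.Str.join "|" parts ++ ")"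

-- int(x[0]) on a single char; Python raises ValueError on a non-digit — those inputs are
-- excluded by Pre_lexi_x_to_9, so the .getD 0 default is never reached inside the claim.
def pvDigit (c : Char) : Int := (PySem.Int.ofStr? (String.mk [c])).getD 0

def lexiAaux : List Char → Bool → String
  | [], incl => if incl then "[0-9]*" else "[0-9]*[1-9]"
  | c :: rest, incl =>
    if incl ∧ rest = [] then "[" ++ String.mk [c] ++ "-9][0-9]*"
    else
      let x0 := pvDigit c
      let parts := [String.mk [c] ++ lexiAaux rest incl]
      let parts := if x0 < 9 then parts ++ ["[" ++ PySem.Int.toStr (x0 + 1) ++ "-9][0-9]*"] else parts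
      mk_or parts

def lexi_x_to_9 (x : String) (incl : Bool) : String := lexiAaux x.toList incl

-- ===== PORT B =====
-- one loop step of Source B (shared by the non-incl initialisation and the loop body)
-- int(c) in Source B; non-digits are outside Pre_lexi_x_to_9 (Python raises ValueError)
def pvDigitB (c : Char) : Int := (PySem.Int.ofStr? (String.mk [c])).getD 0

def pvStepB (acc : String) (c : Char) : String :=
  let d := pvDigitB c
  let branch := String.mk [c] ++ acc
  if d < 9 then "(" ++ branch ++ "|[" ++ PySem.Int.toStr (d + 1) ++ "-9][0-9]*)" else branch

def lexi_x_to_9_alt (x : String) (incl : Bool) : String :=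
  match x.toList with
  | [] => if incl then "[0-9]*" else "[0-9]*[1-9]"
  | c :: rest =>
    let cs := c :: rest
    let lastc := cs.getLastD ' '            -- x[-1]
    let init := if incl then "[" ++ String.mk [lastc] ++ "-9][0-9]*"
                else pvStepB "[0-9]*[1-9]" lastc
    (cs.dropLast.reverse).foldl pvStepB init   -- for c in reversed(x[:-1])

-- ===== PRECONDITION & SPEC =====
-- Pre_ excludes exactly the inputs on which Python A raises ValueError: int() fails on a
-- non-digit character (when incl the LAST character is returned inside [c-9] before any
-- int() call, so it may be anything; every other character must be a digit).
def Pre_lexi_x_to_9 (x : String) (incl : Bool) : Prop :=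
  (if incl then x.toList.dropLast else x.toList).all Char.isDigit = true
instance (x : String) (incl : Bool) : Decidable (Pre_lexi_x_to_9 x incl) := by
  unfold Pre_lexi_x_to_9; infer_instance

def pvWitness_lexi_x_to_9 : String × Bool := ("25", true)

def Spec_lexi_x_to_9 (x : String) (incl : Bool) (out : String) : Prop := out = lexi_x_to_9_alt x incl
instance (x : String) (incl : Bool) (out : String) : Decidable (Spec_lexi_x_to_9 x incl out) := by unfold Spec_lexi_x_to_9; infer_instance

-- ===== CLAIM (what is proved, stated in full; the proofs are below) =====
def Claim_equal_lexi_x_to_9 : Prop := ∀ (x : String) (incl : Bool), Dom_lexi_x_to_9 x incl → Pre_lexi_x_to_9 x incl → Spec_lexi_x_to_9 x incl (lexi_x_to_9 x incl)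

-- ===== LEMMAS AND PROOFS =====

lemma pvDigitB_eq : pvDigitB = pvDigit := rfl

lemma mk_or_single (a : String) : mk_or [a] = a := by simp [mk_or]

lemma mk_or_pair (a b : String) : mk_or [a, b] = "(" ++ a ++ "|" ++ b ++ ")" := by
  have h := String.toList_inj (s₁ := mk_or [a, b]) (s₂ := "(" ++ a ++ "|" ++ b ++ ")")
  rw [← h]
  simp [mk_or, PySem.Str.join, PySem.Chars.join, List.intercalate, List.intersperse]

-- one loop step of B equals one unfolding of A's body (mk_or of the parts list)
lemma step_eq_body (c : Char) (s : String) :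
    pvStepB s c =
      (let x0 := pvDigit c
       let parts := [String.mk [c] ++ s]
       let parts := if x0 < 9 then parts ++ ["[" ++ PySem.Int.toStr (x0 + 1) ++ "-9][0-9]*"] else parts
       mk_or parts) := by
  simp only [pvStepB, pvDigitB_eq]
  split_ifs with h
  case neg => exact (mk_or_single _).symm
  case pos =>
    rw [List.singleton_append, mk_or_pair]
    have h2 := String.toList_inj
      (s₁ := "(" ++ (String.mk [c] ++ s) ++ "|[" ++ PySem.Int.toStr (pvDigit c + 1) ++ "-9][0-9]*)")
      (s₂ := "(" ++ (String.mk [c] ++ s) ++ "|" ++ ("[" ++ PySem.Int.toStr (pvDigit c + 1) ++ "-9][0-9]*") ++ ")")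
    rw [← h2]
    simp

-- B's loop, started from B's initial accumulator, computes A's recursion on any nonempty list
lemma loop_eq (incl : Bool) :
    ∀ (rest : List Char) (c : Char),
      ((c :: rest).dropLast.reverse).foldl pvStepB
        (if incl then "[" ++ String.mk [(c :: rest).getLastD ' '] ++ "-9][0-9]*"
         else pvStepB "[0-9]*[1-9]" ((c :: rest).getLastD ' '))
      = lexiAaux (c :: rest) incl := by
  intro rest
  induction rest with
  | nil =>
    intro c
    cases incl <;>
      simp [lexiAaux, step_eq_body]
  | cons c' rest' ih =>
    intro c
    have hdl : (c :: c' :: rest').dropLast = c :: (c' :: rest').dropLast := rfl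
    have hlast : (c :: c' :: rest').getLastD ' ' = (c' :: rest').getLastD ' ' := rfl
    rw [hdl, hlast, List.reverse_cons, List.foldl_append]
    simp only [List.foldl_cons, List.foldl_nil]
    rw [ih c']
    have : lexiAaux (c :: c' :: rest') incl =
        (let x0 := pvDigit c
         let parts := [String.mk [c] ++ lexiAaux (c' :: rest') incl]
         let parts := if x0 < 9 then parts ++ ["[" ++ PySem.Int.toStr (x0 + 1) ++ "-9][0-9]*"] else parts
         mk_or parts) := by
      simp [lexiAaux]
    rw [this, ← step_eq_body]

-- ===== VERDICT (by name: the statement is the Claim_ definition above) =====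
theorem lexi_x_to_9_spec : Claim_equal_lexi_x_to_9 := by
  intro x incl _ _
  unfold Spec_lexi_x_to_9 lexi_x_to_9 lexi_x_to_9_alt
  cases h : x.toList with
  | nil => simp [lexiAaux]
  | cons c rest => exact (loop_eq incl rest c).symm
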